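-- pv_equiv track=rewrite | github.com/jwnwilson/nw_rig | NWUtilitiesPackage/NWUtilitiesString.py | removeSuffixByChar
-- ===== SOURCE A (Python) =====
-- def removeSuffixByChar(name, char):
--     split = name.split(char)
--     ret= ""
--     if len(split) == 1:
--         return split[0]
--     for x in range(len(split)-1):
--         if x != (len(split)-2):
--             ret += (split[x] + "_")
--         else:
--             ret += (split[x])
--     return ret
-- ===== SOURCE B (Python) =====
-- def removeSuffixByChar(name, char):
--     head, sep, rest = name.partition(char)
--     if not sep:
--         return name
--     out = head
--     while char in rest:
--         head, _, rest = rest.partition(char)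
--         out += "_" + head
--     return out
-- ===== Notes on version B (the rewrite author's own statement) =====
-- stated objective: alternative
-- what changed: Instead of splitting the whole string into a list and joining all-but-last pieces with an index-counted loop and a last-index conditional, B streams through the string with str.partition, peeling one leading segment per step into a string accumulator and stopping (dropping the suffix) when the delimiter no longer occurs in the remainder; no segment list and no index arithmetic are built.
import Mathlib
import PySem

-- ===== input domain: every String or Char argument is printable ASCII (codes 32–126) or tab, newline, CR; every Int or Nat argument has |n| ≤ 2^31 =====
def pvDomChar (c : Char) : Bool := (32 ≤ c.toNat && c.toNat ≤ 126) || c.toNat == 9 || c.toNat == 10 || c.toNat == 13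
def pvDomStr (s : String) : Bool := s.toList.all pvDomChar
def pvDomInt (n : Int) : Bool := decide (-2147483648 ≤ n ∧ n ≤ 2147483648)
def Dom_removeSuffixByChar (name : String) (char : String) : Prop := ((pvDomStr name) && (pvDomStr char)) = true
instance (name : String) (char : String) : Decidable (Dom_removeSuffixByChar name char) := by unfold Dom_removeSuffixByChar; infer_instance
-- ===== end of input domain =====

-- B streams through the string with str.partition, accumulating one segment per step and
-- dropping the suffix, instead of A's split-into-list plus index-counted joining loop;
-- same cost, different decomposition; equivalence is proved for every non-empty `char`.

-- ===== PORT A =====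
-- A's for-loop over range(len(split)-1), accumulating `ret` (over List Char: Str ops are thin wrappers over Chars)
def pvLoopA (parts : List (List Char)) : List Char :=
  (PySem.List.pyRange 0 ((parts.length : Int) - 1)).foldl
    (fun ret x =>
      if x ≠ (parts.length : Int) - 2
      then ret ++ PySem.List.pyGetD parts x [] ++ ['_']
      else ret ++ PySem.List.pyGetD parts x []) []

def removeSuffixByChar (name : String) (char : String) : String :=
  match PySem.Chars.split? name.toList char.toList with
  | none => ""   -- char = "": Python raises ValueError; excluded by Pre_
  | some parts =>
    if parts.length == 1 then String.ofList (PySem.List.pyGetD parts 0 [])  -- split[0] (always in range)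
    else String.ofList (pvLoopA parts)

-- ===== PORT B =====
-- termination fact for B's while-loop (cited by decreasing_by below)
theorem pvDropLt (sep rest : List Char) (hsep : sep ≠ [])
    (h : PySem.Chars.isIn sep rest = true) (k : Nat) :
    (rest.drop (k + sep.length)).length < rest.length := by
  have hinf : sep <:+: rest := (PySem.Chars.isIn_iff_infix _ _).mp h
  have h1 : 1 ≤ sep.length := by cases sep <;> simp_all
  have h2 : sep.length ≤ rest.length := hinf.length_le
  simp only [List.length_drop]
  omega

-- B's `while char in rest:` loop: peel the segment before the first occurrence, append "_" + it
-- (partition is ported via Chars.find — exact: the first occurrence, non-overlapping)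
def pvLoopB (sep : List Char) (hsep : sep ≠ []) (out rest : List Char) : List Char :=
  if h : PySem.Chars.isIn sep rest = true then
    let i := (PySem.Chars.find rest sep).toNat
    pvLoopB sep hsep (out ++ ['_'] ++ rest.take i) (rest.drop (i + sep.length))
  else out
termination_by rest.length
decreasing_by exact pvDropLt sep rest hsep h _

def removeSuffixByChar_alt (name : String) (char : String) : String :=
  if hsep : char.toList = [] then ""   -- char = "": str.partition raises ValueError; excluded by Pre_
  else
    let i := PySem.Chars.find name.toList char.toList
    if i < 0 then name                 -- partition found nothing: sep component empty, return name
    else String.ofList (pvLoopB char.toList hsep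
      (name.toList.take i.toNat) (name.toList.drop (i.toNat + char.toList.length)))

-- ===== PRECONDITION & SPEC =====
-- Pre_ excludes only char = "", where Python raises ValueError in both A (str.split) and B (str.partition).
def Pre_removeSuffixByChar (name : String) (char : String) : Prop := char ≠ ""
instance (name : String) (char : String) : Decidable (Pre_removeSuffixByChar name char) := by unfold Pre_removeSuffixByChar; infer_instance
def pvWitness_removeSuffixByChar : String × String := ("a_b_c", "_")
def Spec_removeSuffixByChar (name : String) (char : String) (out : String) : Prop := out = removeSuffixByChar_alt name char
instance (name : String) (char : String) (out : String) : Decidable (Spec_removeSuffixByChar name char out) := by unfold Spec_removeSuffixByChar; infer_instance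

-- ===== CLAIM (what is proved, stated in full; the proofs are below) =====
def Claim_equal_removeSuffixByChar : Prop := ∀ (name : String) (char : String), Dom_removeSuffixByChar name char → Pre_removeSuffixByChar name char → Spec_removeSuffixByChar name char (removeSuffixByChar name char)

-- ===== LEMMAS AND PROOFS =====

-- splitOn.go always returns at least one more piece than the accumulator holds
theorem pvGoLen (sep : List Char) (fuel : Nat) (l cur : List Char) (acc : List (List Char)) :
    acc.length + 1 ≤ (PySem.Chars.splitOn.go sep fuel l cur acc).length := by
  induction fuel generalizing l cur acc with
  | zero => simp [PySem.Chars.splitOn.go.eq_1]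
  | succ f ih =>
    cases l with
    | nil => rw [PySem.Chars.splitOn.go.eq_2 _ _ _ _ (by simp)]; simp
    | cons c rest =>
      rw [PySem.Chars.splitOn.go.eq_3]
      split_ifs with h
      · calc acc.length + 1 ≤ (cur.reverse :: acc).length + 1 := by simp
          _ ≤ _ := ih _ _ _
      · exact ih rest (c :: cur) acc

-- if sep does not occur in l, go never splits
theorem pvGoNoInfix (sep : List Char) (fuel : Nat) (l cur : List Char) (acc : List (List Char))
    (hf : l.length ≤ fuel) (h : ¬ sep <:+: l) :
    PySem.Chars.splitOn.go sep fuel l cur acc = ((cur.reverse ++ l) :: acc).reverse := by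
  induction fuel generalizing l cur acc with
  | zero =>
    have : l = [] := by cases l <;> simp_all
    subst this; simp [PySem.Chars.splitOn.go.eq_1]
  | succ f ih =>
    cases l with
    | nil => rw [PySem.Chars.splitOn.go.eq_2 _ _ _ _ (by simp)]; simp
    | cons c rest =>
      rw [PySem.Chars.splitOn.go.eq_3]
      have hnp : ¬ sep.isPrefixOf (c :: rest) = true := by
        intro hp
        exact h ((List.isPrefixOf_iff_prefix.mp hp).isInfix)
      rw [if_neg hnp]
      rw [ih rest (c :: cur) acc (by simpa using Nat.le_of_succ_le_succ hf)
        (fun hi => h (List.infix_cons_iff.mpr (Or.inr hi)))]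
      simp

-- if sep does occur in l, go returns at least two more pieces than the accumulator holds
theorem pvGoInfix (sep : List Char) (fuel : Nat) (l cur : List Char) (acc : List (List Char))
    (hsep : sep ≠ []) (hf : l.length ≤ fuel) (h : sep <:+: l) :
    acc.length + 2 ≤ (PySem.Chars.splitOn.go sep fuel l cur acc).length := by
  induction fuel generalizing l cur acc with
  | zero =>
    have : l = [] := by cases l <;> simp_all
    subst this; exact absurd (List.infix_nil.mp h) hsep
  | succ f ih =>
    cases l with
    | nil => exact absurd (List.infix_nil.mp h) hsep
    | cons c rest =>
      rw [PySem.Chars.splitOn.go.eq_3]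
      split_ifs with hp
      · calc acc.length + 2 ≤ (cur.reverse :: acc).length + 1 := by simp
          _ ≤ _ := pvGoLen _ _ _ _ _
      · refine ih rest (c :: cur) acc (by simpa using Nat.le_of_succ_le_succ hf) ?_
        rcases List.infix_cons_iff.mp h with hpre | hi
        · exact absurd (List.isPrefixOf_iff_prefix.mpr hpre) hp
        · exact hi

theorem pvSplitOn_no_infix (s sep : List Char) (h : ¬ sep <:+: s) :
    PySem.Chars.splitOn s sep = [s] := by
  rw [PySem.Chars.splitOn, pvGoNoInfix sep (s.length + 1) s [] [] (by omega) h]; simp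

theorem pvSplitOn_infix (s sep : List Char) (hsep : sep ≠ []) (h : sep <:+: s) :
    2 ≤ (PySem.Chars.splitOn s sep).length := by
  have := pvGoInfix sep (s.length + 1) s [] [] hsep (by omega) h
  simpa [PySem.Chars.splitOn] using this

theorem pvIntercalateCons (s x : List Char) (r : List (List Char)) (hr : r ≠ []) :
    List.intercalate s (x :: r) = x ++ s ++ List.intercalate s r := by
  cases r with
  | nil => exact absurd rfl hr
  | cons y r => rw [List.intercalate, List.intercalate]; simp [List.intersperse]

theorem pvIntercalateConcat (s a : List Char) (qs : List (List Char)) :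
    List.intercalate s (qs ++ [a]) = qs.flatMap (· ++ s) ++ a := by
  induction qs with
  | nil => simp [List.intercalate]
  | cons b qs ih =>
    rw [List.cons_append, pvIntercalateCons s b (qs ++ [a]) (by simp), ih]
    simp

-- the range-indexed flatMap with a last-index test IS intercalate
theorem pvFlatMapRange (ps : List (List Char)) (h : ps ≠ []) :
    (List.range ps.length).flatMap
      (fun k => if k = ps.length - 1 then ps.getD k [] else ps.getD k [] ++ ['_'])
    = List.intercalate ['_'] ps := by
  rcases List.eq_nil_or_concat ps with rfl | ⟨qs, a, rfl⟩
  · exact absurd rfl h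
  · rw [List.concat_eq_append, pvIntercalateConcat]
    have hlen : (qs ++ [a]).length = qs.length + 1 := by simp
    rw [hlen, List.range_succ, List.flatMap_append]
    congr 1
    · rw [List.flatMap, List.flatMap]
      congr 1
      apply List.ext_getElem (by simp)
      intro i h1 h2
      simp only [List.length_map, List.length_range] at h1 h2
      simp only [List.getElem_map, List.getElem_range]
      rw [if_neg (by omega), List.getD_eq_getElem?_getD, List.getElem?_append_left (by omega),
        List.getElem?_eq_getElem (by omega)]
      simp
    · simp

theorem pvLoopA_eq (parts : List (List Char)) (h2 : 2 ≤ parts.length) :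
    pvLoopA parts = List.intercalate ['_'] parts.dropLast := by
  unfold pvLoopA
  have hcongr := PySem.List.foldl_congr_mem (PySem.List.pyRange 0 ((parts.length : Int) - 1))
    (fun ret x =>
      if x ≠ (parts.length : Int) - 2
      then ret ++ PySem.List.pyGetD parts x [] ++ ['_']
      else ret ++ PySem.List.pyGetD parts x [])
    (fun ret x => ret ++
      (if x = (parts.length : Int) - 2 then PySem.List.pyGetD parts x []
       else PySem.List.pyGetD parts x [] ++ ['_'])) []
    (by intro acc x _; by_cases hx : x = (parts.length : Int) - 2 <;> simp [hx])
  rw [hcongr, PySem.List.foldl_append_eq_flatMap, List.nil_append,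
    PySem.List.pyRange_one, List.flatMap_map]
  have hm : ((parts.length : Int) - 1 - 0).toNat = parts.length - 1 := by omega
  rw [hm]
  have hps : parts.dropLast ≠ [] := by
    intro hnil
    have := congrArg List.length hnil
    simp at this; omega
  have hlen : parts.dropLast.length = parts.length - 1 := by simp
  rw [← pvFlatMapRange parts.dropLast hps, hlen]
  rw [List.flatMap, List.flatMap]
  congr 1
  apply List.map_congr_left
  intro k hk
  have hk' : k < parts.length - 1 := List.mem_range.mp hk
  have hget : PySem.List.pyGetD parts (0 + (k : Int)) [] = parts.dropLast.getD k [] := by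
    rw [zero_add, PySem.List.pyGetD_eq_getElem parts [] (by omega) (by exact_mod_cast by omega)]
    rw [List.getD_eq_getElem?_getD, List.getElem?_dropLast, if_pos (by omega)]
    rw [List.getElem?_eq_getElem (by omega)]
    simp
  by_cases hkl : k = parts.length - 1 - 1
  · rw [if_pos (by omega), if_pos (by omega), hget]
  · rw [if_neg (by omega), if_neg (by omega), hget]

-- `find` is determined by the first-occurrence property
theorem pvFindUnique (s sub : List Char) (j : Nat) (hj : sub <+: s.drop j)
    (hmin : ∀ i < j, ¬ sub <+: s.drop i) : PySem.Chars.find s sub = (j : Int) := by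
  have hinf : sub <:+: s := hj.isInfix.trans (List.drop_suffix j s).isInfix
  have hnn : 0 ≤ PySem.Chars.find s sub := (PySem.Chars.find_nonneg_iff _ _).mpr hinf
  obtain ⟨h1, h2⟩ := PySem.Chars.find_spec hnn
  rcases Nat.lt_trichotomy (PySem.Chars.find s sub).toNat j with h | h | h
  · exact absurd h1 (hmin _ h)
  · omega
  · exact absurd hj (h2 j h)

theorem pvFindPrefix (s sub : List Char) (h : sub.isPrefixOf s = true) :
    PySem.Chars.find s sub = 0 := by
  have := pvFindUnique s sub 0 (by simpa using List.isPrefixOf_iff_prefix.mp h)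
    (by intro i hi; omega)
  simpa using this

theorem pvFindCons (c : Char) (rest sub : List Char)
    (hnp : ¬ sub.isPrefixOf (c :: rest) = true) (hin : sub <:+: rest) :
    PySem.Chars.find (c :: rest) sub = 1 + PySem.Chars.find rest sub := by
  have hnn : 0 ≤ PySem.Chars.find rest sub := (PySem.Chars.find_nonneg_iff _ _).mpr hin
  obtain ⟨h1, h2⟩ := PySem.Chars.find_spec hnn
  have := pvFindUnique (c :: rest) sub (1 + (PySem.Chars.find rest sub).toNat)
    (by rw [Nat.add_comm, List.drop_succ_cons]; exact h1)
    (by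
      intro i hi
      cases i with
      | zero => simpa using fun hp => hnp (List.isPrefixOf_iff_prefix.mpr hp)
      | succ k => simpa [List.drop_succ_cons] using h2 k (by omega))
  omega

-- go with extra accumulator = accumulator prepended
theorem pvGoAcc (sep : List Char) (fuel : Nat) (l cur : List Char) (acc : List (List Char)) :
    PySem.Chars.splitOn.go sep fuel l cur acc
      = acc.reverse ++ PySem.Chars.splitOn.go sep fuel l cur [] := by
  induction fuel generalizing l cur acc with
  | zero => simp [PySem.Chars.splitOn.go.eq_1]
  | succ f ih =>
    cases l with
    | nil =>
      rw [PySem.Chars.splitOn.go.eq_2 _ _ _ _ (by simp),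
          PySem.Chars.splitOn.go.eq_2 _ _ _ _ (by simp)]
      simp
    | cons c rest =>
      rw [PySem.Chars.splitOn.go.eq_3, PySem.Chars.splitOn.go.eq_3]
      split_ifs with h
      · rw [ih _ _ (cur.reverse :: acc), ih _ _ [cur.reverse]]; simp
      · exact ih rest (c :: cur) acc

-- go does not depend on the fuel once it covers the input
theorem pvGoFuel (sep : List Char) (hsep : sep ≠ []) (fuel fuel' : Nat) (l cur : List Char)
    (acc : List (List Char)) (hf : l.length ≤ fuel) (hf' : l.length ≤ fuel') :
    PySem.Chars.splitOn.go sep fuel l cur acc = PySem.Chars.splitOn.go sep fuel' l cur acc := by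
  have hs1 : 1 ≤ sep.length := by cases sep <;> simp_all
  induction fuel generalizing fuel' l cur acc with
  | zero =>
    have : l = [] := by cases l <;> simp_all
    subst this
    cases fuel' with
    | zero => rfl
    | succ f' =>
      rw [PySem.Chars.splitOn.go.eq_1,
          PySem.Chars.splitOn.go.eq_2 sep (f' + 1) cur acc (by simp)]
      simp
  | succ f ih =>
    cases fuel' with
    | zero =>
      have : l = [] := by cases l <;> simp_all
      subst this
      rw [PySem.Chars.splitOn.go.eq_1,
          PySem.Chars.splitOn.go.eq_2 sep (f + 1) cur acc (by simp)]
      simp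
    | succ f' =>
      cases l with
      | nil =>
        rw [PySem.Chars.splitOn.go.eq_2 sep (f + 1) cur acc (by simp),
            PySem.Chars.splitOn.go.eq_2 sep (f' + 1) cur acc (by simp)]
      | cons c rest =>
        rw [PySem.Chars.splitOn.go.eq_3, PySem.Chars.splitOn.go.eq_3]
        split_ifs with h
        · exact ih f' _ _ _ (by simp only [List.length_drop, List.length_cons] at hf ⊢; omega)
            (by simp only [List.length_drop, List.length_cons] at hf' ⊢; omega)
        · exact ih f' rest (c :: cur) acc (by simpa using Nat.le_of_succ_le_succ hf)
            (by simpa using Nat.le_of_succ_le_succ hf')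

-- canonical form of go with an empty current piece
theorem pvGoCanon (sep : List Char) (hsep : sep ≠ []) (fuel : Nat) (l : List Char)
    (acc : List (List Char)) (hf : l.length ≤ fuel) :
    PySem.Chars.splitOn.go sep fuel l [] acc = acc.reverse ++ PySem.Chars.splitOn l sep := by
  rw [pvGoAcc, PySem.Chars.splitOn, pvGoFuel sep hsep fuel (l.length + 1) l [] [] hf (by omega)]

-- go on input containing sep = the segment before the first occurrence, then splitOn the rest
theorem pvGoFind (sep : List Char) (hsep : sep ≠ []) (fuel : Nat) (l cur : List Char)
    (acc : List (List Char)) (hf : l.length ≤ fuel) (h : sep <:+: l) :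
    PySem.Chars.splitOn.go sep fuel l cur acc
      = acc.reverse ++ (cur.reverse ++ l.take (PySem.Chars.find l sep).toNat)
          :: PySem.Chars.splitOn (l.drop ((PySem.Chars.find l sep).toNat + sep.length)) sep := by
  induction fuel generalizing l cur acc with
  | zero =>
    have : l = [] := by cases l <;> simp_all
    subst this; exact absurd (List.infix_nil.mp h) hsep
  | succ f ih =>
    cases l with
    | nil => exact absurd (List.infix_nil.mp h) hsep
    | cons c rest =>
      rw [PySem.Chars.splitOn.go.eq_3]
      split_ifs with hp
      · rw [pvFindPrefix _ _ hp]
        have h1 : 1 ≤ sep.length := by cases sep <;> simp_all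
        rw [pvGoCanon sep hsep f _ _ (by simp at hf ⊢; omega)]
        simp
      · have hin : sep <:+: rest := by
          rcases List.infix_cons_iff.mp h with hpre | hi
          · exact absurd (List.isPrefixOf_iff_prefix.mpr hpre) hp
          · exact hi
        rw [ih rest (c :: cur) acc (by simpa using Nat.le_of_succ_le_succ hf) hin]
        have hnn : 0 ≤ PySem.Chars.find rest sep := (PySem.Chars.find_nonneg_iff _ _).mpr hin
        rw [pvFindCons c rest sep hp hin]
        have ht : ((1 : Int) + PySem.Chars.find rest sep).toNat
            = (PySem.Chars.find rest sep).toNat + 1 := by omega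
        rw [ht]
        simp [List.take_succ_cons, List.drop_succ_cons, Nat.add_right_comm]

-- splitOn on input containing sep: head segment :: splitOn of the remainder
theorem pvSplitCons (s sep : List Char) (hsep : sep ≠ []) (h : sep <:+: s) :
    PySem.Chars.splitOn s sep
      = s.take (PySem.Chars.find s sep).toNat
          :: PySem.Chars.splitOn (s.drop ((PySem.Chars.find s sep).toNat + sep.length)) sep := by
  rw [PySem.Chars.splitOn, pvGoFind sep hsep (s.length + 1) s [] [] (by omega) h]
  simp

-- B's loop computes the '_'-joined all-but-last segments (with a leading '_')
theorem pvLoopB_eq (sep : List Char) (hsep : sep ≠ []) (out rest : List Char)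
    (h : sep <:+: rest) :
    pvLoopB sep hsep out rest
      = out ++ ['_'] ++ List.intercalate ['_'] (PySem.Chars.splitOn rest sep).dropLast := by
  have hin : PySem.Chars.isIn sep rest = true := (PySem.Chars.isIn_iff_infix _ _).mpr h
  rw [pvLoopB, dif_pos hin]
  have hsplit := pvSplitCons rest sep hsep h
  by_cases h' : sep <:+: rest.drop ((PySem.Chars.find rest sep).toNat + sep.length)
  · rw [pvLoopB_eq sep hsep _ _ h']
    have h2 := pvSplitOn_infix _ sep hsep h'
    have hne : (PySem.Chars.splitOn (rest.drop ((PySem.Chars.find rest sep).toNat + sep.length)) sep).dropLast ≠ [] := by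
      intro hnil
      have := congrArg List.length hnil
      simp only [List.length_dropLast, List.length_nil] at this
      omega
    rw [hsplit, List.dropLast_cons_of_ne_nil (by intro hnil; rw [hnil] at h2; simp at h2),
      pvIntercalateCons _ _ _ hne]
    simp
  · rw [pvLoopB, dif_neg (by simpa using (PySem.Chars.isIn_eq_false_iff _ _).mpr h')]
    rw [hsplit, pvSplitOn_no_infix _ _ h']
    simp [List.intercalate]
termination_by rest.length
decreasing_by exact pvDropLt sep rest hsep hin _

-- ===== VERDICT (by name: the statement is the Claim_ definition above) =====
theorem removeSuffixByChar_spec : Claim_equal_removeSuffixByChar := by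
  intro name char _ hpre
  unfold Spec_removeSuffixByChar removeSuffixByChar removeSuffixByChar_alt
  have hsep : char.toList ≠ [] := fun hl => hpre (String.toList_eq_nil_iff.mp hl)
  rw [PySem.Chars.split?.eq_1, if_neg (by simpa [List.isEmpty_iff] using hsep)]
  rw [dif_neg hsep]
  dsimp only
  by_cases hinf : char.toList <:+: name.toList
  · have hnn : 0 ≤ PySem.Chars.find name.toList char.toList :=
      (PySem.Chars.find_nonneg_iff _ _).mpr hinf
    rw [if_neg (not_lt.mpr hnn)]
    have h2 := pvSplitOn_infix name.toList char.toList hsep hinf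
    rw [if_neg (by simp; omega), pvLoopA_eq _ h2]
    have hsplit := pvSplitCons name.toList char.toList hsep hinf
    by_cases h' : char.toList <:+: name.toList.drop ((PySem.Chars.find name.toList char.toList).toNat + char.toList.length)
    · rw [pvLoopB_eq _ hsep _ _ h', hsplit]
      have h2' := pvSplitOn_infix _ char.toList hsep h'
      have hne : (PySem.Chars.splitOn (name.toList.drop ((PySem.Chars.find name.toList char.toList).toNat + char.toList.length)) char.toList).dropLast ≠ [] := by
        intro hnil
        have := congrArg List.length hnil
        simp only [List.length_dropLast, List.length_nil] at this
        omega
      rw [List.dropLast_cons_of_ne_nil (by intro hnil; rw [hnil] at h2'; simp at h2'),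
        pvIntercalateCons _ _ _ hne]
    · rw [pvLoopB, dif_neg (by simpa using (PySem.Chars.isIn_eq_false_iff _ _).mpr h')]
      rw [hsplit, pvSplitOn_no_infix _ _ h']
      simp [List.intercalate]
  · have hfind : PySem.Chars.find name.toList char.toList = -1 :=
      (PySem.Chars.find_eq_neg_one_iff _ _).mpr hinf
    rw [if_pos (show PySem.Chars.find name.toList char.toList < 0 by omega)]
    rw [pvSplitOn_no_infix _ _ hinf]
    simp [PySem.List.pyGetD, PySem.List.pyGet?, PySem.List.pyIdx?]
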